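-- pv_equiv track=rewrite | github.com/ray-project/ray | python/ray/serve/utils.py | compute_dict_delta
-- ===== SOURCE A (Python) =====
-- from typing import Iterable, List, Dict, Tuple
--
-- def compute_iterable_delta(old: Iterable,
--                            new: Iterable) -> Tuple[set, set, set]:
--     """Given two iterables, return the entries that's (added, removed, updated).
--
--     Usage:
--         >>> old = {"a", "b"}
--         >>> new = {"a", "d"}
--         >>> compute_dict_delta(old, new)
--         ({"d"}, {"b"}, {"a"})
--     """
--     old_keys, new_keys = set(old), set(new)
--     added_keys = new_keys - old_keys
--     removed_keys = old_keys - new_keys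
--     updated_keys = old_keys.intersection(new_keys)
--     return added_keys, removed_keys, updated_keys
--
-- def compute_dict_delta(old_dict, new_dict) -> Tuple[dict, dict, dict]:
--     """Given two dicts, return the entries that's (added, removed, updated).
--
--     Usage:
--         >>> old = {"a": 1, "b": 2}
--         >>> new = {"a": 3, "d": 4}
--         >>> compute_dict_delta(old, new)
--         ({"d": 4}, {"b": 2}, {"a": 3})
--     """
--     added_keys, removed_keys, updated_keys = compute_iterable_delta(
--         old_dict.keys(), new_dict.keys())
--     return (
--         {k: new_dict[k]
--          for k in added_keys},
--         {k: old_dict[k]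
--          for k in removed_keys},
--         {k: new_dict[k]
--          for k in updated_keys},
--     )
-- ===== SOURCE B (Python) =====
-- def compute_dict_delta(old_dict, new_dict):
--     """Single pass over old_dict: `added` starts as a full copy of new_dict and
--     shrinks as matching keys are popped out into `updated`; whatever old entry
--     finds no key to pop goes to `removed`. No set algebra, no second loop."""
--     added = dict(new_dict)
--     removed = {}
--     updated = {}
--     for k, v in old_dict.items():
--         if k in added:
--             updated[k] = added.pop(k)
--         else:
--             removed[k] = v
--     return added, removed, updated
-- ===== Notes on version B (the rewrite author's own statement) =====
-- stated objective: simpler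
-- what changed: Replaces A's set-algebra pipeline (two set differences, an intersection, then three dict comprehensions that re-look-up every key) by one destructive pass: 'added' begins as a copy of new_dict and shrinks via pop(k) whenever old_dict's single loop meets a shared key, so updated/removed fall out of the same loop and 'added' is simply what survives.
import Mathlib
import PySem

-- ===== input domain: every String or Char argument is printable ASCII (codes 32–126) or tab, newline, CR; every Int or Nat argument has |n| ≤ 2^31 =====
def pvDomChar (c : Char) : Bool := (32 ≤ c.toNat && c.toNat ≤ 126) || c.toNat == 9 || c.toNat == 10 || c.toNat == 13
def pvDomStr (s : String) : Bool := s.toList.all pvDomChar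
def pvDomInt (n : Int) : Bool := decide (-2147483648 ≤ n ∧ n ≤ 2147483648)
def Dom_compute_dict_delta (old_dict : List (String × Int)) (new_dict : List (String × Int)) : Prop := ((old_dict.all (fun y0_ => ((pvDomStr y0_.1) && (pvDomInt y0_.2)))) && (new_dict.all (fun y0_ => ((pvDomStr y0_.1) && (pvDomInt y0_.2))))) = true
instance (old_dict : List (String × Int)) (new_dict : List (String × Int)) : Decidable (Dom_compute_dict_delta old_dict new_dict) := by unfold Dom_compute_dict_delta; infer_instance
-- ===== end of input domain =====

-- B replaces A's set-algebra pipeline (two set differences, an intersection, three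
-- re-look-up dict comprehensions) by ONE destructive pass: `added` starts as a copy of
-- new_dict and shrinks via pop while the single loop over old_dict fills updated/removed.

-- ===== PORT A =====
-- set(old), set(new), then new-old, old-new, old∩new (each in its left operand's insertion order)
def compute_iterable_delta (old : List String) (new : List String) :
    PySem.Set String × PySem.Set String × PySem.Set String :=
  let old_keys := PySem.Set.ofList old
  let new_keys := PySem.Set.ofList new
  let added_keys := PySem.Set.diff new_keys old_keys
  let removed_keys := PySem.Set.diff old_keys new_keys
  let updated_keys := PySem.Set.inter old_keys new_keys
  (added_keys, removed_keys, updated_keys)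

-- {k: d[k] for k in keys}: every k in keys is a key of d, so d[k] never raises and getD is exact here
def pvComprehension (keys : List String) (d : PySem.Dict String Int) : List (String × Int) :=
  keys.map (fun k => (k, d.getD k 0))

def compute_dict_delta (old_dict : List (String × Int)) (new_dict : List (String × Int)) :
    (List (String × Int)) × (List (String × Int)) × (List (String × Int)) :=
  let akru := compute_iterable_delta (old_dict.map Prod.fst) (new_dict.map Prod.fst)
  (pvComprehension akru.1 (PySem.Dict.mk new_dict),
   pvComprehension akru.2.1 (PySem.Dict.mk old_dict),
   pvComprehension akru.2.2 (PySem.Dict.mk new_dict))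

-- ===== PORT B =====
-- added = dict(new_dict); for k, v in old_dict.items(): updated[k] = added.pop(k) if k in added
-- else removed[k] = v.  `added.pop(k)` is ported as getD-then-erase, exact here because the
-- branch guarantees `k in added`.
def compute_dict_delta_alt (old_dict : List (String × Int)) (new_dict : List (String × Int)) :
    (List (String × Int)) × (List (String × Int)) × (List (String × Int)) :=
  let fin := old_dict.foldl
    (fun (st : PySem.Dict String Int × PySem.Dict String Int × PySem.Dict String Int) kv =>
      if st.1.contains kv.1 then
        (st.1.erase kv.1, st.2.1, st.2.2.insert kv.1 (st.1.getD kv.1 0))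
      else
        (st.1, st.2.1.insert kv.1 kv.2, st.2.2))
    (PySem.Dict.mk new_dict, PySem.Dict.empty, PySem.Dict.empty)
  (fin.1.items, fin.2.1.items, fin.2.2.items)

-- ===== PRECONDITION & SPEC =====
-- Pre_ states only the Python dict invariant: keys are unique within each dict. Every input the
-- Python A accepts (two dicts) satisfies it; it excludes only association lists that do not
-- represent any Python dict.
def Pre_compute_dict_delta (old_dict : List (String × Int)) (new_dict : List (String × Int)) : Prop :=
  (old_dict.map Prod.fst).Nodup ∧ (new_dict.map Prod.fst).Nodup
instance (old_dict : List (String × Int)) (new_dict : List (String × Int)) : Decidable (Pre_compute_dict_delta old_dict new_dict) := by unfold Pre_compute_dict_delta; infer_instance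

def pvWitness_compute_dict_delta : (List (String × Int)) × (List (String × Int)) :=
  ([("a", 1), ("b", 2)], [("a", 3), ("d", 4)])

def Spec_compute_dict_delta (old_dict : List (String × Int)) (new_dict : List (String × Int)) (out : (List (String × Int)) × (List (String × Int)) × (List (String × Int))) : Prop := out = compute_dict_delta_alt old_dict new_dict
instance (old_dict : List (String × Int)) (new_dict : List (String × Int)) (out : (List (String × Int)) × (List (String × Int)) × (List (String × Int))) : Decidable (Spec_compute_dict_delta old_dict new_dict out) := by unfold Spec_compute_dict_delta; infer_instance

-- ===== CLAIM (what is proved, stated in full; the proofs are below) =====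
def Claim_equal_compute_dict_delta : Prop := ∀ (old_dict : List (String × Int)) (new_dict : List (String × Int)), Dom_compute_dict_delta old_dict new_dict → Pre_compute_dict_delta old_dict new_dict → Spec_compute_dict_delta old_dict new_dict (compute_dict_delta old_dict new_dict)

-- ===== LEMMAS AND PROOFS =====

-- set(xs) is xs itself when xs has no duplicates
theorem pv_ofList_self (xs : List String) (h : xs.Nodup) : PySem.Set.ofList xs = xs := by
  simp [pysem, h]

-- membership in Dict.mk l is membership in l's key list
theorem pv_mk_contains (l : List (String × Int)) (k : String) :
    (PySem.Dict.mk l).contains k = (l.map Prod.fst).contains k := by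
  induction l with
  | nil => rfl
  | cons p t ih =>
    show (p.1 == k || t.any (fun p => p.1 == k)) = _
    rw [List.map_cons, List.contains_cons,
      show t.any (fun p => p.1 == k) = (PySem.Dict.mk t).contains k from rfl, ih, BEq.comm]

-- erasing a different key changes neither membership nor lookup
theorem pv_any_filter (t : List (String × Int)) (k k' : String) (h : k' ≠ k) :
    ((t.filter (fun p => !(p.1 == k))).any fun p => p.1 == k') = t.any fun p => p.1 == k' := by
  induction t with
  | nil => rfl
  | cons p t ih =>
    by_cases hp : p.1 = k
    · have hkk : (k == k') = false := by simp [Ne.symm h]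
      simp [hp, hkk, ih]
    · simp [hp, ih]

theorem pv_find_filter (t : List (String × Int)) (k k' : String) (h : k' ≠ k) :
    (t.filter (fun p => !(p.1 == k))).find? (fun p => p.1 == k')
      = t.find? (fun p => p.1 == k') := by
  induction t with
  | nil => rfl
  | cons p t ih =>
    by_cases hp : p.1 = k
    · have hkk : (k == k') = false := by simp [Ne.symm h]
      simp [hp, hkk, ih]
    · by_cases hq : p.1 = k'
      · simp [hq, h]
      · simp [hp, hq, ih]

theorem pv_contains_erase_ne (d : PySem.Dict String Int) (k k' : String) (h : k' ≠ k) :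
    (d.erase k).contains k' = d.contains k' := by
  show ((d.items.filter (fun p => !(p.1 == k))).any fun p => p.1 == k')
      = d.items.any fun p => p.1 == k'
  exact pv_any_filter d.items k k' h

theorem pv_getD_erase_ne (d : PySem.Dict String Int) (k k' : String) (h : k' ≠ k) :
    (d.erase k).getD k' 0 = d.getD k' 0 := by
  show (((d.items.filter (fun p => !(p.1 == k))).find? (fun p => p.1 == k')).map Prod.snd).getD 0
      = ((d.items.find? (fun p => p.1 == k')).map Prod.snd).getD 0
  rw [pv_find_filter d.items k k' h]

-- THE LOOP INVARIANT for B's single pass: starting from (a, r, u) with a arbitrary and the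
-- keys of l fresh for r and u, the pass leaves in `a` exactly the entries whose key l never
-- mentions, files the l-entries missing from a into r, and the shared ones (with a's values)
-- into u.
theorem pv_pop_loop (a r u : PySem.Dict String Int) (l : List (String × Int))
    (hnd : (l.map Prod.fst).Nodup)
    (hr : ∀ kv ∈ l, r.contains kv.1 = false) (hu : ∀ kv ∈ l, u.contains kv.1 = false) :
    (l.foldl (fun (st : PySem.Dict String Int × PySem.Dict String Int × PySem.Dict String Int) kv =>
        if st.1.contains kv.1 then
          (st.1.erase kv.1, st.2.1, st.2.2.insert kv.1 (st.1.getD kv.1 0))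
        else
          (st.1, st.2.1.insert kv.1 kv.2, st.2.2)) (a, r, u))
    = (PySem.Dict.mk (a.items.filter (fun p => !(l.map Prod.fst).contains p.1)),
       (l.filter (fun kv => !a.contains kv.1)).foldl (fun d kv => d.insert kv.1 kv.2) r,
       (l.filter (fun kv => a.contains kv.1)).foldl
         (fun d kv => d.insert kv.1 (a.getD kv.1 0)) u) := by
  induction l generalizing a r u with
  | nil => simp
  | cons kv t ih =>
    have hnd0 : kv.1 ∉ t.map Prod.fst ∧ (t.map Prod.fst).Nodup := by
      rw [List.map_cons] at hnd; exact List.nodup_cons.mp hnd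
    have hne : ∀ kv' ∈ t, kv'.1 ≠ kv.1 := fun kv' hmem heq =>
      hnd0.1 (heq ▸ List.mem_map_of_mem hmem)
    by_cases hc : a.contains kv.1 = true
    · rw [List.foldl_cons]
      rw [if_pos hc]
      rw [ih (a.erase kv.1) r (u.insert kv.1 (a.getD kv.1 0)) hnd0.2
        (fun kv' h' => hr kv' (List.mem_cons_of_mem _ h'))
        (fun kv' h' => by
          rw [PySem.Dict.contains_insert]
          simp [hne kv' h', hu kv' (List.mem_cons_of_mem _ h')])]
      refine Prod.ext ?_ (Prod.ext ?_ ?_) <;> dsimp only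
      · -- added component
        congr 1
        show (a.items.filter (fun p => !(p.1 == kv.1))).filter _ = _
        rw [List.filter_filter]
        refine List.filter_congr ?_
        intro p _
        rw [List.map_cons, List.contains_cons]
        simp [Bool.and_comm, BEq.comm]
      · -- removed component
        rw [List.filter_cons, if_neg (by simp [hc])]
        congr 1
        refine List.filter_congr ?_
        intro kv' h'
        rw [pv_contains_erase_ne _ _ _ (hne kv' h')]
      · -- updated component
        rw [List.filter_cons, if_pos (by simp [hc]), List.foldl_cons,
          show (t.filter (fun kv' => (a.erase kv.1).contains kv'.1))
              = t.filter (fun kv' => a.contains kv'.1) from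
            List.filter_congr (fun kv' h' => pv_contains_erase_ne _ _ _ (hne kv' h'))]
        exact PySem.List.foldl_congr_mem _ _ _ _ (fun acc kv' h' => by
          rw [pv_getD_erase_ne _ _ _ (hne kv' (List.mem_of_mem_filter h'))])
    · have hc' : a.contains kv.1 = false := by simpa using hc
      rw [List.foldl_cons, if_neg (by simp [hc'])]
      rw [ih a (r.insert kv.1 kv.2) u hnd0.2
        (fun kv' h' => by
          rw [PySem.Dict.contains_insert]
          simp [hne kv' h', hr kv' (List.mem_cons_of_mem _ h')])
        (fun kv' h' => hu kv' (List.mem_cons_of_mem _ h'))]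
      refine Prod.ext ?_ (Prod.ext ?_ ?_) <;> dsimp only
      · congr 1
        refine List.filter_congr ?_
        intro p hp
        have hpk : (p.1 == kv.1) = false := by
          by_contra hx
          have : p.1 = kv.1 := by
            cases hx' : (p.1 == kv.1) with
            | false => exact absurd hx' hx
            | true => exact beq_iff_eq.mp hx'
          have : a.contains kv.1 = true := by
            show a.items.any (fun q => q.1 == kv.1) = true
            exact List.any_eq_true.mpr ⟨p, hp, by simp [this]⟩
          simp [this] at hc'
        rw [List.map_cons, List.contains_cons]
        simp [hpk]
      · rw [List.filter_cons, if_pos (by simp [hc']), List.foldl_cons]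
      · rw [List.filter_cons, if_neg (by simp [hc'])]

-- looked-up values agree with the stored pair when the dict's keys are unique
theorem pv_getD_mem (l : List (String × Int)) (kv : String × Int)
    (h : kv ∈ l) (hnd : (l.map Prod.fst).Nodup) :
    (PySem.Dict.mk l).getD kv.1 0 = kv.2 :=
  PySem.Dict.getD_of_mem_items (PySem.Dict.mk l) (by simpa using h) (by simpa using hnd) 0

-- ===== VERDICT (by name: the statement is the Claim_ definition above) =====
theorem compute_dict_delta_spec : Claim_equal_compute_dict_delta := by
  intro old_dict new_dict _ hpre
  obtain ⟨ho, hn⟩ := hpre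
  show compute_dict_delta old_dict new_dict = compute_dict_delta_alt old_dict new_dict
  have hcnew : ∀ x, PySem.Set.contains (new_dict.map Prod.fst) x
      = (PySem.Dict.mk new_dict).contains x := fun x => (pv_mk_contains _ _).symm
  have hfm : ∀ (p : String → Bool) (l : List (String × Int)),
      (l.filter (fun kv => p kv.1)).map Prod.fst = (l.map Prod.fst).filter p := by
    intro p l; rw [List.filter_map]; rfl
  simp only [compute_dict_delta, compute_dict_delta_alt, compute_iterable_delta,
    pvComprehension, PySem.Set.diff, PySem.Set.inter, pv_ofList_self _ ho, pv_ofList_self _ hn,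
    hcnew]
  rw [pv_pop_loop _ _ _ _ ho (by simp) (by simp)]
  refine Prod.ext ?_ (Prod.ext ?_ ?_) <;> dsimp only
  · -- added: A maps over new-minus-old keys; B keeps the unpopped entries of dict(new_dict)
    show ((new_dict.map Prod.fst).filter
        (fun x => !PySem.Set.contains (old_dict.map Prod.fst) x)).map
        (fun k => (k, (PySem.Dict.mk new_dict).getD k 0))
      = (PySem.Dict.mk new_dict).items.filter (fun p => !(old_dict.map Prod.fst).contains p.1)
    have hitems : (PySem.Dict.mk new_dict).items = new_dict := rfl
    rw [hitems]
    have hset : ∀ x, PySem.Set.contains (old_dict.map Prod.fst) x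
        = (old_dict.map Prod.fst).contains x := by
      intro x; simp [pysem]
    rw [show ((new_dict.map Prod.fst).filter
        (fun x => !PySem.Set.contains (old_dict.map Prod.fst) x))
      = (new_dict.filter (fun kv => !PySem.Set.contains (old_dict.map Prod.fst) kv.1)).map
        Prod.fst from (hfm _ _).symm]
    rw [List.map_map]
    rw [show (new_dict.filter (fun kv => !PySem.Set.contains (old_dict.map Prod.fst) kv.1))
      = (new_dict.filter (fun p => !(old_dict.map Prod.fst).contains p.1)) from
      List.filter_congr (fun kv _ => by rw [hset])]
    refine (List.map_congr_left ?_).trans (List.map_id _)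
    intro kv hmem
    have := pv_getD_mem new_dict kv (List.mem_of_mem_filter hmem) hn
    simp [Function.comp, this]
  · -- removed
    rw [PySem.Dict.items_foldl_insert_fresh _ Prod.fst Prod.snd _ (by simp)
      (by rw [hfm (fun x => !(PySem.Dict.mk new_dict).contains x) old_dict]
          exact ho.filter _)]
    rw [show ((old_dict.map Prod.fst).filter
        (fun x => !(PySem.Dict.mk new_dict).contains x))
      = (old_dict.filter (fun kv => !(PySem.Dict.mk new_dict).contains kv.1)).map Prod.fst from
      (hfm _ _).symm]
    rw [List.map_map]
    have hemp : (PySem.Dict.empty : PySem.Dict String Int).items = [] := rfl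
    rw [hemp, List.nil_append]
    refine List.map_congr_left ?_
    intro kv hmem
    have := pv_getD_mem old_dict kv (List.mem_of_mem_filter hmem) ho
    simp [Function.comp, this]
  · -- updated
    rw [PySem.Dict.items_foldl_insert_fresh _ Prod.fst
      (fun kv => (PySem.Dict.mk new_dict).getD kv.1 0) _ (by simp)
      (by rw [hfm (fun x => (PySem.Dict.mk new_dict).contains x) old_dict]
          exact ho.filter _)]
    rw [show ((old_dict.map Prod.fst).filter
        (fun x => (PySem.Dict.mk new_dict).contains x))
      = (old_dict.filter (fun kv => (PySem.Dict.mk new_dict).contains kv.1)).map Prod.fst from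
      (hfm _ _).symm]
    rw [List.map_map]
    have hemp : (PySem.Dict.empty : PySem.Dict String Int).items = [] := rfl
    rw [hemp, List.nil_append]
    rfl
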